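-- pv_equiv track=rewrite | github.com/serafim228337/-2024 | стеки/+-.py | operacii
-- ===== SOURCE A (Python) =====
-- def operacii(s):
--     count = 0
--     for i in s:
--         if i == "+":
--             count += 1
--         elif i == "-":
--             count = max(0, count - 1)
--     return(count)
-- ===== SOURCE B (Python) =====
-- def operacii(s):
--     running = 0
--     minrun = 0
--     for ch in s:
--         if ch == "+":
--             running += 1
--         elif ch == "-":
--             running -= 1
--         if running < minrun:
--             minrun = running
--     return running - minrun
-- ===== Notes on version B (the rewrite author's own statement) =====
-- stated objective: alternative
-- what changed: Replaces the per-step max(0, count-1) clamp with an unclamped running balance plus a tracked minimum prefix, returning running - minrun at the end (the reflected-walk identity).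
import Mathlib
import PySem

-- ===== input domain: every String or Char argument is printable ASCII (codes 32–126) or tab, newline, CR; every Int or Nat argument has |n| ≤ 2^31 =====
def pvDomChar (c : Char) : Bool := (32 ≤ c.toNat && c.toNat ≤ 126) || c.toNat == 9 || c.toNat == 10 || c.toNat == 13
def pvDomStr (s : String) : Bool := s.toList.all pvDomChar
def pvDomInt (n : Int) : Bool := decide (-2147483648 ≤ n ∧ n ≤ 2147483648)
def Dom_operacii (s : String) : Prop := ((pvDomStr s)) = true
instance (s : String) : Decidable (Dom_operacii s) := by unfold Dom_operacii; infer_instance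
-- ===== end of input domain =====

-- B replaces A's per-step max(0, count-1) clamp with an unclamped running balance
-- plus a tracked minimum prefix, returning running - minrun (alternative decomposition).

-- ===== PORT A =====
def operaciiStepA (count : Int) (i : Char) : Int :=
  if i = '+' then count + 1
  else if i = '-' then max 0 (count - 1)
  else count

def operacii (s : String) : Int :=
  s.toList.foldl operaciiStepA 0

-- ===== PORT B =====
def operaciiStepB (p : Int × Int) (ch : Char) : Int × Int :=
  let running := if ch = '+' then p.1 + 1 else if ch = '-' then p.1 - 1 else p.1
  (running, if running < p.2 then running else p.2)

def operacii_alt (s : String) : Int :=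
  let st := s.toList.foldl operaciiStepB (0, 0)
  st.1 - st.2

-- ===== PRECONDITION & SPEC =====
def Spec_operacii (s : String) (out : Int) : Prop := out = operacii_alt s
instance (s : String) (out : Int) : Decidable (Spec_operacii s out) := by unfold Spec_operacii; infer_instance

-- ===== CLAIM (what is proved, stated in full; the proofs are below) =====
def Claim_equal_operacii : Prop := ∀ (s : String), Dom_operacii s → Spec_operacii s (operacii s)

-- ===== LEMMAS AND PROOFS =====
lemma operacii_loop_inv (l : List Char) (count running minrun : Int)
    (h : count = running - minrun) (h1 : minrun ≤ running) (h2 : minrun ≤ 0) :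
    l.foldl operaciiStepA count
      = (l.foldl operaciiStepB (running, minrun)).1
        - (l.foldl operaciiStepB (running, minrun)).2 := by
  induction l generalizing count running minrun with
  | nil => simpa using h
  | cons c tl ih =>
    simp only [List.foldl]
    have hA : operaciiStepA count c =
        if c = '+' then count + 1 else if c = '-' then max 0 (count - 1) else count := rfl
    have hB : operaciiStepB (running, minrun) c =
        (if c = '+' then running + 1 else if c = '-' then running - 1 else running,
         if (if c = '+' then running + 1 else if c = '-' then running - 1 else running) < minrun
         then (if c = '+' then running + 1 else if c = '-' then running - 1 else running)
         else minrun) := rfl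
    rw [hA, hB]
    split_ifs with c1 c2 c3 c4 c5 <;>
      exact ih _ _ _ (by omega) (by omega) (by omega)
-- ===== VERDICT (by name: the statement is the Claim_ definition above) =====
theorem operacii_spec : Claim_equal_operacii := by
  intro s _
  unfold Spec_operacii operacii operacii_alt
  exact operacii_loop_inv s.toList 0 0 0 (by norm_num) le_rfl le_rfl
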